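-- pv_equiv track=rewrite | github.com/z-soham/localTranscript | src/summarizer.py | _strip_srt_timestamps
-- ===== SOURCE A (Python) =====
-- def _strip_srt_timestamps(text: str) -> str:
--     """Remove SRT sequence numbers and timestamp lines, keeping only dialogue."""
--     lines = text.splitlines()
--     result: list[str] = []
--     for line in lines:
--         stripped = line.strip()
--         if stripped.isdigit():
--             continue
--         if "-->" in stripped:
--             continue
--         result.append(stripped)
--     # Collapse multiple blank lines to a single one
--     cleaned: list[str] = []
--     prev_blank = False
--     for line in result:
--         if line == "":
--             if not prev_blank:
--                 cleaned.append(line)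
--             prev_blank = True
--         else:
--             cleaned.append(line)
--             prev_blank = False
--     return "\n".join(cleaned).strip()
-- ===== SOURCE B (Python) =====
-- def _strip_srt_timestamps(text: str) -> str:
--     """Remove SRT sequence numbers and timestamp lines, keeping only dialogue."""
--     out: list[str] = []
--     pending = False
--     for line in text.splitlines():
--         s = line.strip()
--         if s.isdigit() or "-->" in s:
--             continue
--         if s == "":
--             pending = bool(out)
--         else:
--             if pending:
--                 out.append("")
--                 pending = False
--             out.append(s)
--     return "\n".join(out)
-- ===== Notes on version B (the rewrite author's own statement) =====
-- stated objective: simpler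
-- what changed: B replaces A's two sequential loops (filter/strip into a list, then collapse blank runs) plus the final strip() by a single pass that keeps a pending-blank-separator flag and only emits a blank line immediately before the next dialogue line, so no trailing/leading blanks ever appear and the final strip() disappears.
import Mathlib
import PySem

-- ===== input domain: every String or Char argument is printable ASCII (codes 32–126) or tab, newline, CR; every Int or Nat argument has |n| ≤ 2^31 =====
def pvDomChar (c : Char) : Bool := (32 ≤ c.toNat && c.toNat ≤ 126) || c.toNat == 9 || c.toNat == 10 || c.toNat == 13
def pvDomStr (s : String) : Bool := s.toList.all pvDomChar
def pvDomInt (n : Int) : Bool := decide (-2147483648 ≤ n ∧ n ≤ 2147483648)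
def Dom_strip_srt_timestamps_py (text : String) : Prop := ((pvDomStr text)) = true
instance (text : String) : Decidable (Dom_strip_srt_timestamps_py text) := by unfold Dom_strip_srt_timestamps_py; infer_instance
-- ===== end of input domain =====

-- B replaces A's two sequential loops (filter-and-strip, then collapse blanks) and final strip
-- by one pass with a pending-blank-separator flag, so no final strip is needed (objective: simpler).

-- ===== PORT A =====
-- first loop body: skip digit-only and '-->' lines, append the stripped line
def pvA_filter (result : List String) (line : String) : List String :=
  let stripped := PySem.Str.strip line
  if PySem.Str.strIsdigit stripped then result
  else if PySem.Str.isIn "-->" stripped then result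
  else result ++ [stripped]

-- second loop body: collapse runs of blank lines (state = (cleaned, prev_blank))
def pvA_collapse (st : List String × Bool) (line : String) : List String × Bool :=
  if line = "" then
    (if st.2 = false then st.1 ++ [line] else st.1, true)
  else (st.1 ++ [line], false)

def strip_srt_timestamps_py (text : String) : String :=
  let lines := PySem.Str.splitlines text
  let result := lines.foldl pvA_filter []
  let st := result.foldl pvA_collapse ([], false)
  PySem.Str.strip (PySem.Str.join "\n" st.1)

-- ===== PORT B =====
-- single-pass loop body: state = (out, pending); a blank just records a pending
-- separator (only when out is nonempty); a dialogue line flushes the pending blank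
def pvB_step (st : List String × Bool) (line : String) : List String × Bool :=
  let s := PySem.Str.strip line
  if PySem.Str.strIsdigit s then st
  else if PySem.Str.isIn "-->" s then st
  else if s = "" then (st.1, !st.1.isEmpty)
  else ((if st.2 then st.1 ++ [""] else st.1) ++ [s], false)

def strip_srt_timestamps_py_alt (text : String) : String :=
  let st := (PySem.Str.splitlines text).foldl pvB_step ([], false)
  PySem.Str.join "\n" st.1

-- ===== PRECONDITION & SPEC =====
def Spec_strip_srt_timestamps_py (text : String) (out : String) : Prop := out = strip_srt_timestamps_py_alt text
instance (text : String) (out : String) : Decidable (Spec_strip_srt_timestamps_py text out) := by unfold Spec_strip_srt_timestamps_py; infer_instance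

-- ===== CLAIM (what is proved, stated in full; the proofs are below) =====
def Claim_equal_strip_srt_timestamps_py : Prop := ∀ (text : String), Dom_strip_srt_timestamps_py text → Spec_strip_srt_timestamps_py text (strip_srt_timestamps_py text)

-- ===== LEMMAS AND PROOFS =====

-- the common filter: `some (line.strip())` on kept lines, `none` on skipped ones
def pvKeep (line : String) : Option String :=
  let s := PySem.Str.strip line
  if PySem.Str.strIsdigit s then none
  else if PySem.Str.isIn "-->" s then none
  else some s

-- B's step restricted to kept (already stripped) lines
def pvG (st : List String × Bool) (s : String) : List String × Bool :=
  if s = "" then (st.1, !st.1.isEmpty)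
  else ((if st.2 then st.1 ++ [""] else st.1) ++ [s], false)

-- boundary property of a stripped string: no whitespace at either end
def pvQ (x : String) : Prop :=
  (∀ c, x.toList.head? = some c → PySem.Chars.isspace c = false) ∧
  (∀ c, x.toList.getLast? = some c → PySem.Chars.isspace c = false)

-- the loop invariant: A's (cleaned, prev_blank) vs B's (out, pending)
def pvInv (a b : List String × Bool) : Prop :=
  (a = ([], false) ∧ b = ([], false)) ∨
  (a = ([""], true) ∧ b = ([], false)) ∨
  (∃ lead ob, (lead = [] ∨ lead = [""]) ∧ ob ≠ [] ∧ ob.head? ≠ some "" ∧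
    ob.getLast? ≠ some "" ∧ (∀ x ∈ ob, pvQ x) ∧
    ((a = (lead ++ ob, false) ∧ b = (ob, false)) ∨
     (a = (lead ++ ob ++ [""], true) ∧ b = (ob, true))))

lemma pv_fold_filter (lines : List String) (acc : List String) :
    lines.foldl pvA_filter acc = acc ++ lines.filterMap pvKeep := by
  induction lines generalizing acc with
  | nil => simp
  | cons l ls ih =>
    by_cases h1 : PySem.Chars.strIsdigit (PySem.Chars.strip l.toList)
    · simp [pvA_filter, pvKeep, h1, ih]
    · by_cases h2 : PySem.Chars.isIn ['-', '-', '>'] (PySem.Chars.strip l.toList)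
      · simp [pvA_filter, pvKeep, h1, h2, ih]
      · simp [pvA_filter, pvKeep, h1, h2, ih]

lemma pv_fold_B (lines : List String) (st : List String × Bool) :
    lines.foldl pvB_step st = (lines.filterMap pvKeep).foldl pvG st := by
  induction lines generalizing st with
  | nil => rfl
  | cons l ls ih =>
    by_cases h1 : PySem.Chars.strIsdigit (PySem.Chars.strip l.toList)
    · simp [pvB_step, pvKeep, h1, ih]
    · by_cases h2 : PySem.Chars.isIn ['-', '-', '>'] (PySem.Chars.strip l.toList)
      · simp [pvB_step, pvKeep, h1, h2, ih]
      · simp [pvB_step, pvKeep, pvG, h1, h2, ih]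

lemma pv_head?_dropWhile {α : Type} {p : α → Bool} {l : List α} {c : α}
    (h : (l.dropWhile p).head? = some c) : p c = false := by
  induction l with
  | nil => simp at h
  | cons x xs ih =>
    rw [List.dropWhile_cons] at h
    by_cases hp : p x
    · exact ih (by simpa [hp] using h)
    · simp [hp] at h
      simpa [h] using hp

lemma pvQ_strip (y : String) : pvQ (PySem.Str.strip y) := by
  constructor
  · intro c hc
    rw [PySem.Str.toList_strip] at hc
    unfold PySem.Chars.strip PySem.Chars.rstrip PySem.Chars.lstrip at hc
    set w := List.dropWhile PySem.Chars.isspace y.toList with hw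
    obtain ⟨t, ht⟩ := List.dropWhile_suffix (l := w.reverse) PySem.Chars.isspace
    have hw' : w = (List.dropWhile PySem.Chars.isspace w.reverse).reverse ++ t.reverse := by
      have := congrArg List.reverse ht
      simpa using this.symm
    rcases hd : (List.dropWhile PySem.Chars.isspace w.reverse).reverse with _ | ⟨x, xs⟩
    · simp [hd] at hc
    · rw [hd] at hc
      simp at hc
      rw [← hc]
      have hhw : w.head? = some x := by rw [hw', hd]; rfl
      exact pv_head?_dropWhile (hw ▸ hhw)
  · intro c hc
    rw [PySem.Str.toList_strip] at hc
    unfold PySem.Chars.strip PySem.Chars.rstrip at hc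
    rw [← List.head?_reverse, List.reverse_reverse] at hc
    exact pv_head?_dropWhile hc

lemma pvQ_filterMap {lines : List String} {x : String}
    (h : x ∈ lines.filterMap pvKeep) : pvQ x := by
  obtain ⟨y, _, hy⟩ := List.mem_filterMap.mp h
  unfold pvKeep at hy
  by_cases h1 : PySem.Chars.strIsdigit (PySem.Chars.strip y.toList)
  · simp [h1] at hy
  · by_cases h2 : PySem.Chars.isIn ['-', '-', '>'] (PySem.Chars.strip y.toList)
    · simp [h1, h2] at hy
    · simp [h1, h2] at hy
      rw [← hy]
      exact pvQ_strip y

lemma pv_inv_step (a b : List String × Bool) (s : String) (hq : pvQ s)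
    (h : pvInv a b) : pvInv (pvA_collapse a s) (pvG b s) := by
  by_cases hs : s = ""
  · subst hs
    rcases h with ⟨ha, hb⟩ | ⟨ha, hb⟩ | ⟨lead, ob, hlead, hob, hh, hl, hqs, hc⟩
    · subst ha; subst hb
      right; left; exact ⟨rfl, rfl⟩
    · subst ha; subst hb
      right; left; exact ⟨rfl, rfl⟩
    · right; right
      refine ⟨lead, ob, hlead, hob, hh, hl, hqs, ?_⟩
      rcases hc with ⟨ha, hb⟩ | ⟨ha, hb⟩ <;> subst ha <;> subst hb <;> right
      · exact ⟨by simp [pvA_collapse], by simp [pvG, hob]⟩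
      · exact ⟨by simp [pvA_collapse], by simp [pvG, hob]⟩
  · rcases h with ⟨ha, hb⟩ | ⟨ha, hb⟩ | ⟨lead, ob, hlead, hob, hh, hl, hqs, hc⟩
    · subst ha; subst hb
      right; right
      exact ⟨[], [s], Or.inl rfl, by simp, by simp [hs], by simp [hs],
        by simpa using hq, Or.inl ⟨by simp [pvA_collapse, hs], by simp [pvG, hs]⟩⟩
    · subst ha; subst hb
      right; right
      exact ⟨[""], [s], Or.inr rfl, by simp, by simp [hs], by simp [hs],
        by simpa using hq, Or.inl ⟨by simp [pvA_collapse, hs], by simp [pvG, hs]⟩⟩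
    · right; right
      rcases hc with ⟨ha, hb⟩ | ⟨ha, hb⟩ <;> subst ha <;> subst hb
      · refine ⟨lead, ob ++ [s], hlead, by simp, ?_, by simp [hs], ?_,
          Or.inl ⟨by simp [pvA_collapse, hs], by simp [pvG, hs]⟩⟩
        · rcases ob with _ | ⟨o, os⟩
          · exact absurd rfl hob
          · simpa using hh
        · intro x hx
          rcases List.mem_append.mp hx with hx | hx
          · exact hqs x hx
          · simp at hx; subst hx; exact hq
      · refine ⟨lead, ob ++ [""] ++ [s], hlead, by simp, ?_, by simp [hs], ?_, ?_⟩
        · rcases ob with _ | ⟨o, os⟩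
          · exact absurd rfl hob
          · simpa using hh
        · intro x hx
          rcases List.mem_append.mp hx with hx | hx
          · rcases List.mem_append.mp hx with hx | hx
            · exact hqs x hx
            · simp at hx; subst hx
              exact ⟨by intro c hc; simp at hc, by intro c hc; simp at hc⟩
          · simp at hx; subst hx; exact hq
        · exact Or.inl ⟨by simp [pvA_collapse, hs], by simp [pvG, hs]⟩

lemma pv_inv_fold (L : List String) (hL : ∀ x ∈ L, pvQ x) (a b : List String × Bool)
    (h : pvInv a b) : pvInv (L.foldl pvA_collapse a) (L.foldl pvG b) := by
  induction L generalizing a b with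
  | nil => exact h
  | cons x xs ih =>
    exact ih (fun y hy => hL y (List.mem_cons_of_mem _ hy)) _ _
      (pv_inv_step a b x (hL x (List.mem_cons_self)) h)

-- dropWhile over an all-true prefix followed by a list whose head fails the predicate
lemma pv_dropWhile_wrap {p : Char → Bool} (pre J : List Char)
    (hp : ∀ c ∈ pre, p c = true) (hJ : ∀ c, J.head? = some c → p c = false) :
    List.dropWhile p (pre ++ J) = J := by
  rw [List.dropWhile_append, List.dropWhile_eq_nil_iff.mpr hp]
  rcases J with _ | ⟨c, cs⟩
  · simp
  · simp [hJ c rfl]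

lemma pv_strip_wrap (pre J suf : List Char)
    (hp : ∀ c ∈ pre, PySem.Chars.isspace c = true)
    (hs : ∀ c ∈ suf, PySem.Chars.isspace c = true)
    (hJh : ∀ c, J.head? = some c → PySem.Chars.isspace c = false)
    (hJl : ∀ c, J.getLast? = some c → PySem.Chars.isspace c = false)
    (hJne : J ≠ []) :
    PySem.Chars.strip (pre ++ (J ++ suf)) = J := by
  unfold PySem.Chars.strip PySem.Chars.lstrip PySem.Chars.rstrip
  rw [pv_dropWhile_wrap pre (J ++ suf) hp ?_]
  · rw [List.reverse_append]
    rw [pv_dropWhile_wrap suf.reverse J.reverse (by simpa using hs)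
      (by simpa [List.head?_reverse] using hJl)]
    exact List.reverse_reverse J
  · intro c hc
    rcases J with _ | ⟨x, xs⟩
    · exact absurd rfl hJne
    · simp at hc; subst hc; exact hJh x rfl

lemma pv_join_head? (sep c0 : List Char) (rest : List (List Char)) (h : c0 ≠ []) :
    (PySem.Chars.join sep (c0 :: rest)).head? = c0.head? := by
  rcases rest with _ | ⟨d, ds⟩
  · rw [PySem.Chars.join_singleton]
  · rw [PySem.Chars.join_cons_cons]
    rcases c0 with _ | ⟨x, xs⟩
    · exact absurd rfl h
    · simp

lemma pv_join_getLast? (sep e : List Char) (core : List (List Char)) (he : e ≠ [])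
    (h : core.getLast? = some e) : (PySem.Chars.join sep core).getLast? = e.getLast? := by
  induction core with
  | nil => simp at h
  | cons c rest ih =>
    rcases rest with _ | ⟨d, ds⟩
    · simp at h; subst h; rw [PySem.Chars.join_singleton]
    · have h' : (d :: ds).getLast? = some e := by
        rw [← h]; exact (List.getLast?_cons_cons ..).symm
      have hlast := ih h'
      obtain ⟨z, hz⟩ : ∃ z, e.getLast? = some z := by
        rcases hze : e.getLast? with _ | z
        · exact absurd (List.getLast?_eq_none_iff.mp hze) he
        · exact ⟨z, rfl⟩
      rw [PySem.Chars.join_cons_cons, List.append_assoc, List.getLast?_append,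
        List.getLast?_append, hlast, hz]
      rfl

lemma pv_join_append_nil (sep c : List Char) (rest : List (List Char)) :
    PySem.Chars.join sep ((c :: rest) ++ [[]]) = PySem.Chars.join sep (c :: rest) ++ sep := by
  induction rest generalizing c with
  | nil =>
    rw [PySem.Chars.join_singleton]
    show PySem.Chars.join sep [c, []] = c ++ sep
    rw [PySem.Chars.join_cons_cons, PySem.Chars.join_singleton, List.append_nil]
  | cons d ds ih =>
    calc PySem.Chars.join sep ((c :: d :: ds) ++ [[]])
        = c ++ sep ++ PySem.Chars.join sep (d :: (ds ++ [[]])) := PySem.Chars.join_cons_cons ..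
      _ = c ++ sep ++ (PySem.Chars.join sep (d :: ds) ++ sep) := by rw [← ih d]; rfl
      _ = (c ++ sep ++ PySem.Chars.join sep (d :: ds)) ++ sep := by simp [List.append_assoc]
      _ = PySem.Chars.join sep (c :: d :: ds) ++ sep := by rw [PySem.Chars.join_cons_cons]

lemma pv_join_nil_cons (sep : List Char) (core : List (List Char)) (h : core ≠ []) :
    PySem.Chars.join sep ([] :: core) = sep ++ PySem.Chars.join sep core := by
  rcases core with _ | ⟨c, cs⟩
  · exact absurd rfl h
  · rw [PySem.Chars.join_cons_cons]; simp

-- the heart: stripping the joined cleaned list of A gives exactly the join of B's out list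
lemma pv_strip_join_wrap (lead tail : List (List Char)) (ob : List String)
    (hlead : lead = [] ∨ lead = [[]]) (htail : tail = [] ∨ tail = [[]])
    (hob : ob ≠ []) (hh : ob.head? ≠ some "") (hl : ob.getLast? ≠ some "")
    (hq : ∀ x ∈ ob, pvQ x) :
    PySem.Chars.strip (PySem.Chars.join ['\n'] (lead ++ ob.map String.toList ++ tail)) =
      PySem.Chars.join ['\n'] (ob.map String.toList) := by
  rcases ob with _ | ⟨x, rest⟩
  · exact absurd rfl hob
  have hxne : x ≠ "" := fun h => hh (by simp [h])
  have hxl : x.toList ≠ [] := by simp [String.toList_eq_nil_iff, hxne]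
  have hmap : (x :: rest).map String.toList = x.toList :: rest.map String.toList := rfl
  have hJh : ∀ c, (PySem.Chars.join ['\n'] ((x :: rest).map String.toList)).head? = some c →
      PySem.Chars.isspace c = false := by
    intro c hc
    rw [hmap, pv_join_head? _ _ _ hxl] at hc
    exact (hq x (by simp)).1 c hc
  have hJne : PySem.Chars.join ['\n'] ((x :: rest).map String.toList) ≠ [] := by
    intro h
    have := pv_join_head? ['\n'] x.toList (rest.map String.toList) hxl
    rw [hmap] at h
    rw [h] at this
    rcases hx : x.toList with _ | ⟨ch, tl⟩
    · exact hxl hx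
    · rw [hx] at this; simp at this
  obtain ⟨e, he⟩ : ∃ e, (x :: rest).getLast? = some e := by
    rcases hg : (x :: rest).getLast? with _ | e
    · exact absurd (List.getLast?_eq_none_iff.mp hg) (by simp)
    · exact ⟨e, rfl⟩
  have hene : e ≠ "" := fun h => hl (h ▸ he)
  have hel : e.toList ≠ [] := by simp [String.toList_eq_nil_iff, hene]
  have hgl : ((x :: rest).map String.toList).getLast? = some e.toList := by
    rw [List.getLast?_map, he]; rfl
  have hJl : ∀ c, (PySem.Chars.join ['\n'] ((x :: rest).map String.toList)).getLast? = some c →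
      PySem.Chars.isspace c = false := by
    intro c hc
    rw [pv_join_getLast? ['\n'] e.toList _ hel hgl] at hc
    exact (hq e (List.mem_of_getLast? he)).2 c hc
  have hnl : ∀ c ∈ ['\n'], PySem.Chars.isspace c = true := by
    intro c hc; simp at hc; subst hc; rfl
  rcases htail with rfl | rfl <;> rcases hlead with rfl | rfl
  · have := pv_strip_wrap [] (PySem.Chars.join ['\n'] ((x :: rest).map String.toList)) []
      (by simp) (by simp) hJh hJl hJne
    simpa using this
  · have heq : ([[]] : List (List Char)) ++ (x :: rest).map String.toList ++ [] =
        [] :: (x :: rest).map String.toList := by simp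
    rw [heq, pv_join_nil_cons _ _ (by simp [hmap])]
    have := pv_strip_wrap ['\n'] (PySem.Chars.join ['\n'] ((x :: rest).map String.toList)) []
      hnl (by simp) hJh hJl hJne
    simpa using this
  · rw [List.nil_append, hmap, pv_join_append_nil]
    have := pv_strip_wrap [] (PySem.Chars.join ['\n'] (x.toList :: rest.map String.toList)) ['\n']
      (by simp) hnl (by rw [← hmap]; exact hJh) (by rw [← hmap]; exact hJl) (by rw [← hmap]; exact hJne)
    simpa using this
  · have heq : ([[]] : List (List Char)) ++ (x :: rest).map String.toList ++ [[]] =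
        ([] :: (x :: rest).map String.toList) ++ [[]] := by simp
    rw [heq]
    rw [show ([] :: (x :: rest).map String.toList) = ([] :: x.toList :: rest.map String.toList) from by rw [hmap]]
    rw [pv_join_append_nil, ← hmap, pv_join_nil_cons _ _ (by simp [hmap])]
    have := pv_strip_wrap ['\n'] (PySem.Chars.join ['\n'] ((x :: rest).map String.toList)) ['\n']
      hnl hnl hJh hJl hJne
    simpa [List.append_assoc] using this

theorem pv_main (L : List String) (hL : ∀ x ∈ L, pvQ x) :
    PySem.Str.strip (PySem.Str.join "\n" (L.foldl pvA_collapse ([], false)).1) =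
      PySem.Str.join "\n" (L.foldl pvG ([], false)).1 := by
  have hinv := pv_inv_fold L hL ([], false) ([], false) (Or.inl ⟨rfl, rfl⟩)
  rcases hinv with ⟨ha, hb⟩ | ⟨ha, hb⟩ | ⟨lead, ob, hlead, hob, hh, hl, hq, hc⟩
  · rw [ha, hb]
    apply String.toList_inj.mp
    simp [PySem.Chars.join_nil, PySem.Chars.strip, PySem.Chars.lstrip, PySem.Chars.rstrip]
  · rw [ha, hb]
    apply String.toList_inj.mp
    simp [PySem.Chars.join_nil, PySem.Chars.join_singleton, PySem.Chars.strip,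
      PySem.Chars.lstrip, PySem.Chars.rstrip]
  · have hlead' : lead.map String.toList = [] ∨ lead.map String.toList = [[]] := by
      rcases hlead with h | h <;> subst h <;> simp
    apply String.toList_inj.mp
    rcases hc with ⟨ha, hb⟩ | ⟨ha, hb⟩ <;> rw [ha, hb] <;>
      simp only [PySem.Str.toList_strip, PySem.Str.toList_join, List.map_append]
    · have := pv_strip_join_wrap (lead.map String.toList) [] ob hlead' (Or.inl rfl) hob hh hl hq
      simpa using this
    · have := pv_strip_join_wrap (lead.map String.toList) [[]] ob hlead' (Or.inr rfl) hob hh hl hq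
      simpa using this

-- ===== VERDICT (by name: the statement is the Claim_ definition above) =====
theorem strip_srt_timestamps_py_spec : Claim_equal_strip_srt_timestamps_py := by
  intro text _
  unfold Spec_strip_srt_timestamps_py
  simp only [strip_srt_timestamps_py, strip_srt_timestamps_py_alt]
  rw [pv_fold_filter, pv_fold_B]
  simp only [List.nil_append]
  exact pv_main ((PySem.Str.splitlines text).filterMap pvKeep)
    (fun x hx => pvQ_filterMap hx)
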